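-- pv_equiv track=rewrite | github.com/jeanbaptistemora/fluidattacks-universe2 | analytics/singer/tap_git/tap_git/__init__.py | replace_mailmap
-- ===== SOURCE A (Python) =====
-- def replace_mailmap(user_n, user_e, mailmap):
--     """ uses the list of tuples generated in load_mailmap to return canonical name and email """
--
--     # pylint: disable=C0103
--     # N = canonical name
--     # E = canonical email
--     # n = git name
--     # e = git email
--     # _ = anything
--
--     user_N, user_E = user_n, user_e
--     for N, E, n, e in mailmap:
--         # NEne
--         if user_n == n and user_e == e:
--             user_N, user_E = N, E
--         # NE_e
--         if n is None and user_e == e: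
--             user_N, user_E = N, E
--         # _E_e
--         if N is None and n is None and user_e == e:
--             user_E = E
--         # N__e
--         if E is None and n is None and user_e == e:
--             user_N = N
--     return (user_N, user_E)
-- ===== SOURCE B (Python) =====
-- def replace_mailmap(user_n, user_e, mailmap):
--     """ uses the list of tuples generated in load_mailmap to return canonical name and email """
--     # Last-match-wins: the four branches of the original collapse to one rule,
--     # so scan backwards and stop at the first matching entry.
--     for N, E, n, e in reversed(mailmap):
--         if e == user_e and (n == user_n or n is None):
--             return (N, E)
--     return (user_n, user_e)
-- ===== Notes on version B (the rewrite author's own statement) =====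
-- stated objective: simpler
-- what changed: The four accumulating branches of the forward full scan collapse to one last-match-wins rule, implemented as a short-circuiting reverse scan that returns at the first entry whose git email equals user_e and whose git name is user_n or None.
-- outside the precondition, e.g. on replace_mailmap('n', 'e', [(None, 'X', None, 'e')]): A returns (None, 'X'), B returns (None, 'X')
import Mathlib
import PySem

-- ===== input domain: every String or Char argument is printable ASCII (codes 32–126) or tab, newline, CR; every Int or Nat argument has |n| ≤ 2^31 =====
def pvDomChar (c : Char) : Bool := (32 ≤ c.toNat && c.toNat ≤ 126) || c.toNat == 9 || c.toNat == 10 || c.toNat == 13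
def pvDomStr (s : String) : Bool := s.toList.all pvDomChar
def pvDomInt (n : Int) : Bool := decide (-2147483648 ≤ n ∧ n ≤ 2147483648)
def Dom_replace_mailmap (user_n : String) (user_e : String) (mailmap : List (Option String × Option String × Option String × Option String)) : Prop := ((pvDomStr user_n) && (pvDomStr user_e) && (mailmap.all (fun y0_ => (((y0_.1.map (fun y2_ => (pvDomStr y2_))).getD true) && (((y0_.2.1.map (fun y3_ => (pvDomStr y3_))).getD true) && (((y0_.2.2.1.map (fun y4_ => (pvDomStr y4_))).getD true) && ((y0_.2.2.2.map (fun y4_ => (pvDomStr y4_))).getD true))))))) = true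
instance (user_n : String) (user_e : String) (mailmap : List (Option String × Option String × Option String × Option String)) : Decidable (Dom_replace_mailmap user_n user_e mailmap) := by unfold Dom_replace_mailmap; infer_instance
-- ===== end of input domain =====

-- B collapses A's four accumulating branches into one last-match-wins rule, implemented
-- as a short-circuiting reverse scan (objective: simpler).


-- ===== PORT A =====
-- Loop state carries Python's values, where user_N / user_E may become None;
-- the final .getD is only the Lean typing of the return (Pre_ guarantees it is never used).
def pvStepA (user_n : String) (user_e : String) (st : Option String × Option String) (t : Option String × Option String × Option String × Option String) : Option String × Option String :=
  let (N, E, n, e) := t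
  let st := if n == some user_n && e == some user_e then (N, E) else st
  let st := if n == none && e == some user_e then (N, E) else st
  let st := if N == none && n == none && e == some user_e then (st.1, E) else st
  let st := if E == none && n == none && e == some user_e then (N, st.2) else st
  st

def replace_mailmap (user_n : String) (user_e : String) (mailmap : List (Option String × Option String × Option String × Option String)) : String × String :=
  let st := mailmap.foldl (pvStepA user_n user_e) (some user_n, some user_e)
  (st.1.getD user_n, st.2.getD user_e)

-- ===== PORT B =====
-- first match in the reversed list; None canonical fields are excluded by Pre_
def replace_mailmap_alt (user_n : String) (user_e : String) (mailmap : List (Option String × Option String × Option String × Option String)) : String × String :=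
  match mailmap.reverse.find? (fun t => t.2.2.2 == some user_e && (t.2.2.1 == some user_n || t.2.2.1 == none)) with
  | some (N, E, _, _) => (N.getD user_n, E.getD user_e)
  | none => (user_n, user_e)

-- ===== PRECONDITION & SPEC =====
-- Pre_ excludes inputs on which a matching mailmap entry has a None canonical name or email:
-- there Python A returns a tuple containing None, which is not a value of the declared type String × String.
def Pre_replace_mailmap (user_n : String) (user_e : String) (mailmap : List (Option String × Option String × Option String × Option String)) : Prop :=
  ∀ t ∈ mailmap, (t.2.2.2 = some user_e ∧ (t.2.2.1 = some user_n ∨ t.2.2.1 = none)) → t.1 ≠ none ∧ t.2.1 ≠ none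
instance (user_n : String) (user_e : String) (mailmap : List (Option String × Option String × Option String × Option String)) : Decidable (Pre_replace_mailmap user_n user_e mailmap) := by unfold Pre_replace_mailmap; infer_instance

def pvWitness_replace_mailmap : String × String × (List (Option String × Option String × Option String × Option String)) :=
  ("alice", "a@x", [(some "Alice", some "alice@x", none, some "a@x"), (some "Bob", some "bob@x", some "bob", some "b@x")])

def Spec_replace_mailmap (user_n : String) (user_e : String) (mailmap : List (Option String × Option String × Option String × Option String)) (out : String × String) : Prop := out = replace_mailmap_alt user_n user_e mailmap
instance (user_n : String) (user_e : String) (mailmap : List (Option String × Option String × Option String × Option String)) (out : String × String) : Decidable (Spec_replace_mailmap user_n user_e mailmap out) := by unfold Spec_replace_mailmap; infer_instance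

-- ===== CLAIM (what is proved, stated in full; the proofs are below) =====
def Claim_equal_replace_mailmap : Prop := ∀ (user_n : String) (user_e : String) (mailmap : List (Option String × Option String × Option String × Option String)), Dom_replace_mailmap user_n user_e mailmap → Pre_replace_mailmap user_n user_e mailmap → Spec_replace_mailmap user_n user_e mailmap (replace_mailmap user_n user_e mailmap)

-- ===== LEMMAS AND PROOFS =====

-- the matching predicate of B
def pvMatch (user_n : String) (user_e : String) (t : Option String × Option String × Option String × Option String) : Bool :=
  t.2.2.2 == some user_e && (t.2.2.1 == some user_n || t.2.2.1 == none)

-- under Pre_, one step of A is: replace the state by (N, E) iff the entry matches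
theorem pvStepA_eq (user_n user_e : String) (st : Option String × Option String)
    (t : Option String × Option String × Option String × Option String)
    (h : (t.2.2.2 = some user_e ∧ (t.2.2.1 = some user_n ∨ t.2.2.1 = none)) → t.1 ≠ none ∧ t.2.1 ≠ none) :
    pvStepA user_n user_e st t = if pvMatch user_n user_e t then (t.1, t.2.1) else st := by
  obtain ⟨N, E, n, e⟩ := t
  simp only [pvStepA, pvMatch] at *
  by_cases he : e = some user_e
  · subst he
    by_cases hn1 : n = some user_n
    · subst hn1
      have := h ⟨rfl, Or.inl rfl⟩
      simp_all
    · by_cases hn2 : n = none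
      · subst hn2
        have := h ⟨rfl, Or.inr rfl⟩
        simp_all
      · simp_all
  · simp_all

-- under Pre_, the fold is last-match-wins from any start state
theorem pvFold_eq (user_n user_e : String)
    (l : List (Option String × Option String × Option String × Option String))
    (st : Option String × Option String)
    (h : ∀ t ∈ l, (t.2.2.2 = some user_e ∧ (t.2.2.1 = some user_n ∨ t.2.2.1 = none)) → t.1 ≠ none ∧ t.2.1 ≠ none) :
    l.foldl (pvStepA user_n user_e) st =
      match l.reverse.find? (pvMatch user_n user_e) with
      | some t => (t.1, t.2.1)
      | none => st := by
  induction l generalizing st with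
  | nil => simp
  | cons t rest ih =>
    have ht := h t (List.mem_cons_self ..)
    have hrest : ∀ u ∈ rest, (u.2.2.2 = some user_e ∧ (u.2.2.1 = some user_n ∨ u.2.2.1 = none)) → u.1 ≠ none ∧ u.2.1 ≠ none :=
      fun u hu => h u (List.mem_cons_of_mem _ hu)
    simp only [List.foldl_cons, List.reverse_cons, List.find?_append]
    rw [ih (pvStepA user_n user_e st t) hrest]
    cases hfind : rest.reverse.find? (pvMatch user_n user_e) with
    | some u => simp [hfind]
    | none =>
      simp
      rw [pvStepA_eq user_n user_e st t ht]
      by_cases hm : pvMatch user_n user_e t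
      · simp [hm]
      · simp [hm]

-- under Pre_, a found entry has Some canonical fields
theorem pvFound_some (user_n user_e : String)
    (l : List (Option String × Option String × Option String × Option String))
    (h : ∀ t ∈ l, (t.2.2.2 = some user_e ∧ (t.2.2.1 = some user_n ∨ t.2.2.1 = none)) → t.1 ≠ none ∧ t.2.1 ≠ none)
    (t : Option String × Option String × Option String × Option String)
    (hfind : l.reverse.find? (pvMatch user_n user_e) = some t) :
    t.1 ≠ none ∧ t.2.1 ≠ none := by
  have hmem : t ∈ l.reverse := List.mem_of_find?_eq_some hfind
  have hp : pvMatch user_n user_e t = true := List.find?_some hfind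
  obtain ⟨N, E, n, e⟩ := t
  simp only [pvMatch] at hp
  apply h _ (List.mem_reverse.mp hmem)
  simp only [Bool.and_eq_true, Bool.or_eq_true, beq_iff_eq] at hp
  exact ⟨hp.1, hp.2.elim Or.inl Or.inr⟩

-- ===== VERDICT (by name: the statement is the Claim_ definition above) =====
theorem replace_mailmap_spec : Claim_equal_replace_mailmap := by
  intro user_n user_e mailmap _hdom hpre
  unfold Spec_replace_mailmap replace_mailmap replace_mailmap_alt
  rw [show (fun t : Option String × Option String × Option String × Option String =>
      t.2.2.2 == some user_e && (t.2.2.1 == some user_n || t.2.2.1 == none)) = pvMatch user_n user_e from rfl]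
  rw [pvFold_eq user_n user_e mailmap _ hpre]
  cases hfind : mailmap.reverse.find? (pvMatch user_n user_e) with
  | none => simp
  | some t =>
    obtain ⟨hN, hE⟩ := pvFound_some user_n user_e mailmap hpre t hfind
    obtain ⟨N, E, n, e⟩ := t
    cases N with
    | none => exact absurd rfl hN
    | some a =>
      cases E with
      | none => exact absurd rfl hE
      | some b => simp
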